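-- pv_equiv track=rewrite | github.com/Significant-Gravitas/AutoGPT | classic/original_autogpt/autogpt/agents/prompt_strategies/rewoo.py | _parse_bracket_arguments
-- ===== SOURCE A (Python) =====
-- from typing import Any, Optional
--
-- def _parse_bracket_arguments(args_str: str) -> dict[str, Any]:
--     """Parse paper-style bracket arguments: Tool[query, #E1].
--
--     The bracket format from the paper uses simpler argument syntax:
--     - Tool[search query]
--     - Tool[#E1]
--     - Tool[query, #E1]
--     """
--     args_str = args_str.strip()
--     arguments: dict[str, Any] = {}
--
--     # Empty arguments
--     if not args_str:
--         return arguments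
--
--     # Single variable reference
--     if args_str.startswith("#E") and "," not in args_str:
--         return {"input": args_str}
--
--     # Check for key=value pairs first
--     if "=" in args_str:
--         # Mixed format: key=value pairs
--         parts = [p.strip() for p in args_str.split(",")]
--         for i, part in enumerate(parts):
--             if "=" in part:
--                 key, value = part.split("=", 1)
--                 value = value.strip().strip("\"'")
--                 arguments[key.strip()] = value
--             else:
--                 # Positional argument
--                 arg_key = "query" if i == 0 else f"arg{i}"
--                 arguments[arg_key] = part.strip().strip("\"'")
--         return arguments
--
--     # Simple format: comma-separated values
--     if "," in args_str:
--         parts = [p.strip() for p in args_str.split(",")]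
--         arguments["query"] = parts[0].strip("\"'")
--         for i, part in enumerate(parts[1:], 1):
--             arguments[f"arg{i}"] = part.strip().strip("\"'")
--     else:
--         # Single argument - treat as query
--         arguments["query"] = args_str.strip("\"'")
--
--     return arguments
-- ===== SOURCE B (Python) =====
-- def _parse_bracket_arguments(args_str: str) -> dict:
--     # Cursor-based scanner: instead of staged split()/enumerate passes with three
--     # branch regimes, walk the string once with find(), slicing off one part at a
--     # time and handling every part uniformly (key=value via find('='), else positional).
--     args_str = args_str.strip()
--     if not args_str:
--         return {}
--     if args_str.startswith("#E") and "," not in args_str: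
--         return {"input": args_str}
--     arguments = {}
--     rest, i = args_str, 0
--     while True:
--         j = rest.find(",")
--         part = (rest if j < 0 else rest[:j]).strip()
--         e = part.find("=")
--         if e >= 0:
--             arguments[part[:e].strip()] = part[e + 1:].strip().strip("\"'")
--         else:
--             arguments["query" if i == 0 else f"arg{i}"] = part.strip("\"'")
--         if j < 0:
--             return arguments
--         rest, i = rest[j + 1:], i + 1
-- ===== Notes on version B (the rewrite author's own statement) =====
-- stated objective: alternative
-- what changed: A's staged split()/strip()/enumerate passes with three branch regimes (whole-string equals-sign dispatch, comma loop, single-value case) are replaced by a find()-driven cursor scan that slices one comma part off the string per step and handles every part uniformly (keyed when it contains an equals sign, else positional).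
import Mathlib
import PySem

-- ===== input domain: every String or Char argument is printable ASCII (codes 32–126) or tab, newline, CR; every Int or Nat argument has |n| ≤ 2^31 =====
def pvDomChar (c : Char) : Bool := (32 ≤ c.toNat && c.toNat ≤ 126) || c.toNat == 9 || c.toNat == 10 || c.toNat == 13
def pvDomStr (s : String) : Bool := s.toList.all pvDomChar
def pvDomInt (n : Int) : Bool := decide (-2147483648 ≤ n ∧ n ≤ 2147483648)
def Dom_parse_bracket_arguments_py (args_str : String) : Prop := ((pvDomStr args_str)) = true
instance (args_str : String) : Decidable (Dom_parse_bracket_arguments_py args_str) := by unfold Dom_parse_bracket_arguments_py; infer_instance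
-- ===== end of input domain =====

-- B replaces A's staged split()/enumerate passes and three branch regimes by a single
-- find()-driven cursor scan that slices off one comma part at a time (objective: alternative).

-- ===== PORT A =====
def parse_bracket_arguments_py (args_str : String) : List (String × String) :=
  let s := PySem.Chars.strip args_str.toList
  if s = [] then []
  else if PySem.Chars.startswith s ['#', 'E'] && !PySem.Chars.isIn [','] s then
    [("input", String.ofList s)]
  else if PySem.Chars.isIn ['='] s then
    -- Mixed format: key=value pairs
    let parts := (PySem.Chars.splitOn s [',']).map PySem.Chars.strip
    (((PySem.List.enumerate parts).foldl
        (fun (d : PySem.Dict (List Char) (List Char)) ip =>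
          if PySem.Chars.isIn ['='] ip.2 then
            match PySem.Chars.splitOnMax ip.2 ['='] 1 with
            | key :: value :: _ =>
                d.insert (PySem.Chars.strip key)
                  (PySem.Chars.stripChars (PySem.Chars.strip value) ['"', '\''])
            | _ => d   -- unreachable: part.split("=", 1) has two pieces when '=' is in part
          else
            d.insert (if ip.1 = 0 then "query".toList
                      else "arg".toList ++ PySem.Int.toChars ip.1)
              (PySem.Chars.stripChars (PySem.Chars.strip ip.2) ['"', '\'']))
        PySem.Dict.empty).items).map (fun p => (String.ofList p.1, String.ofList p.2))
  else if PySem.Chars.isIn [','] s then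
    -- Simple format: comma-separated values
    let parts := (PySem.Chars.splitOn s [',']).map PySem.Chars.strip
    match parts with
    | [] => []   -- unreachable: str.split never returns an empty list
    | p0 :: rest =>
      (((PySem.List.enumerate rest 1).foldl
          (fun (d : PySem.Dict (List Char) (List Char)) ip =>
            d.insert ("arg".toList ++ PySem.Int.toChars ip.1)
              (PySem.Chars.stripChars (PySem.Chars.strip ip.2) ['"', '\'']))
          (PySem.Dict.empty.insert "query".toList
            (PySem.Chars.stripChars p0 ['"', '\'']))).items).map
        (fun p => (String.ofList p.1, String.ofList p.2))
  else
    [("query", String.ofList (PySem.Chars.stripChars s ['"', '\'']))]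

-- ===== PORT B =====
-- the per-part store of Source B: key=value via find("="), else positional
def pvStore (d : PySem.Dict (List Char) (List Char)) (part : List Char) (i : Int) :
    PySem.Dict (List Char) (List Char) :=
  let e := PySem.Chars.find part ['=']
  if 0 ≤ e then
    d.insert (PySem.Chars.strip (PySem.List.slice part none (some e)))
      (PySem.Chars.stripChars (PySem.Chars.strip (PySem.List.slice part (some (e + 1)) none))
        ['"', '\''])
  else
    d.insert (if i = 0 then "query".toList else "arg".toList ++ PySem.Int.toChars i)
      (PySem.Chars.stripChars part ['"', '\''])

-- the while-loop of Source B: cursor scan, one comma part sliced off per step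
def pvGo (rest : List Char) (i : Int) (d : PySem.Dict (List Char) (List Char)) :
    PySem.Dict (List Char) (List Char) :=
  let j := PySem.Chars.find rest [',']
  if h : j < 0 then
    pvStore d (PySem.Chars.strip rest) i
  else
    pvGo (PySem.List.slice rest (some (j + 1)) none) (i + 1)
      (pvStore d (PySem.Chars.strip (PySem.List.slice rest none (some j))) i)
termination_by rest.length
decreasing_by
  have hj0 : 0 ≤ j := by omega
  have hinf : [','] <:+: rest := (PySem.Chars.find_nonneg_iff rest [',']).mp hj0
  have hne : rest ≠ [] := by rintro rfl; simpa using hinf.sublist.length_le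
  rw [PySem.List.slice_from _ (by omega : (0:Int) ≤ j + 1)]
  have h1 : 1 ≤ (j + 1).toNat := by omega
  have h2 : 1 ≤ rest.length := by
    cases rest with | nil => exact absurd rfl hne | cons a t => simp
  simp only [List.length_drop]
  omega

def parse_bracket_arguments_py_alt (args_str : String) : List (String × String) :=
  let s := PySem.Chars.strip args_str.toList
  if s = [] then []
  else if PySem.Chars.startswith s ['#', 'E'] && !PySem.Chars.isIn [','] s then
    [("input", String.ofList s)]
  else
    ((pvGo s 0 PySem.Dict.empty).items).map (fun p => (String.ofList p.1, String.ofList p.2))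

-- ===== PRECONDITION & SPEC =====
def Spec_parse_bracket_arguments_py (args_str : String) (out : List (String × String)) : Prop := out = parse_bracket_arguments_py_alt args_str
instance (args_str : String) (out : List (String × String)) : Decidable (Spec_parse_bracket_arguments_py args_str out) := by unfold Spec_parse_bracket_arguments_py; infer_instance

-- ===== CLAIM (what is proved, stated in full; the proofs are below) =====
def Claim_equal_parse_bracket_arguments_py : Prop := ∀ (args_str : String), Dom_parse_bracket_arguments_py args_str → Spec_parse_bracket_arguments_py args_str (parse_bracket_arguments_py args_str)

-- ===== LEMMAS AND PROOFS =====
theorem pv_splitOn_go_not_mem (c : Char) :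
    ∀ (fuel : Nat) (l cur : List Char) (acc : List (List Char)), c ∉ l →
      PySem.Chars.splitOn.go [c] fuel l cur acc = ((cur.reverse ++ l) :: acc).reverse := by
  intro fuel
  induction fuel with
  | zero => intro l cur acc _; rw [PySem.Chars.splitOn.go]
  | succ n ih =>
    intro l cur acc h
    cases l with
    | nil =>
      rw [PySem.Chars.splitOn.go]
      · simp
      · omega
    | cons x rest =>
      rw [PySem.Chars.splitOn.go]
      have hx : x ≠ c := fun hh => h (hh ▸ List.mem_cons_self)
      have : [c].isPrefixOf (x :: rest) = false := by
        simp [List.isPrefixOf]; exact fun hh => (hx hh.symm).elim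
      rw [this]
      simp only [Bool.false_eq_true, if_false]
      rw [ih rest (x :: cur) acc (fun hh => h (List.mem_cons_of_mem _ hh))]
      simp

theorem pv_splitOn_not_mem {c : Char} {l : List Char} (h : c ∉ l) :
    PySem.Chars.splitOn l [c] = [l] := by
  rw [PySem.Chars.splitOn, pv_splitOn_go_not_mem c _ _ _ _ h]; simp

theorem pv_splitOn_go_chars (sep : List Char) (Q : Char → Prop) :
    ∀ (fuel : Nat) (l cur : List Char) (acc : List (List Char)),
      (∀ p ∈ acc, ∀ ch ∈ p, Q ch) → (∀ ch ∈ cur, Q ch) → (∀ ch ∈ l, Q ch) →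
      ∀ p ∈ PySem.Chars.splitOn.go sep fuel l cur acc, ∀ ch ∈ p, Q ch := by
  intro fuel
  induction fuel with
  | zero =>
    intro l cur acc hacc hcur hl p hp
    rw [PySem.Chars.splitOn.go] at hp
    simp at hp
    rcases hp with hp | hp
    · exact hacc p hp
    · intro ch hch
      rw [hp] at hch
      simp at hch
      rcases hch with hch | hch
      · exact hcur ch hch
      · exact hl ch hch
  | succ n ih =>
    intro l cur acc hacc hcur hl p hp
    cases l with
    | nil =>
      rw [PySem.Chars.splitOn.go] at hp
      · simp at hp
        rcases hp with hp | hp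
        · exact hacc p hp
        · intro ch hch; rw [hp] at hch; simp at hch; exact hcur ch hch
      · omega
    | cons x rest =>
      rw [PySem.Chars.splitOn.go] at hp
      by_cases hpre : sep.isPrefixOf (x :: rest) = true
      · rw [if_pos hpre] at hp
        refine ih _ _ _ ?_ ?_ ?_ p hp
        · intro q hq
          simp at hq
          rcases hq with hq | hq
          · intro ch hch; rw [hq] at hch; simp at hch; exact hcur ch hch
          · exact hacc q hq
        · simp
        · intro ch hch; exact hl ch (List.mem_of_mem_drop hch)
      · rw [if_neg hpre] at hp
        refine ih _ _ _ hacc ?_ ?_ p hp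
        · intro ch hch
          simp at hch
          rcases hch with hch | hch
          · exact hl ch (by simp [hch])
          · exact hcur ch hch
        · intro ch hch; exact hl ch (List.mem_cons_of_mem _ hch)

theorem pv_splitOn_chars {s sep p : List Char} (hp : p ∈ PySem.Chars.splitOn s sep)
    {ch : Char} (hch : ch ∈ p) : ch ∈ s := by
  rw [PySem.Chars.splitOn] at hp
  exact pv_splitOn_go_chars sep (· ∈ s) _ s [] [] (by simp) (by simp) (fun _ h => h) p hp ch hch

theorem pv_mem_strip {ch : Char} {l : List Char} (h : ch ∈ PySem.Chars.strip l) : ch ∈ l := by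
  rw [PySem.Chars.strip, PySem.Chars.rstrip, PySem.Chars.lstrip] at h
  simp at h
  have h2 := (List.dropWhile_sublist _).mem h
  simp at h2
  exact (List.dropWhile_sublist _).mem h2

theorem pv_isIn_singleton (c : Char) (l : List Char) :
    PySem.Chars.isIn [c] l = true ↔ c ∈ l := by
  rw [PySem.Chars.isIn_iff_infix]; exact List.singleton_infix_iff c l

theorem pv_lstrip_rstrip_lstrip (u : List Char) :
    PySem.Chars.lstrip (PySem.Chars.rstrip (PySem.Chars.lstrip u)) = PySem.Chars.rstrip (PySem.Chars.lstrip u) := by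
  rcases h : PySem.Chars.rstrip (PySem.Chars.lstrip u) with _ | ⟨x, xs⟩
  · simp [PySem.Chars.lstrip]
  · have hpre : (x :: xs) <+: PySem.Chars.lstrip u := by
      rw [← h, PySem.Chars.rstrip]
      refine ⟨(List.takeWhile PySem.Chars.isspace (PySem.Chars.lstrip u).reverse).reverse, ?_⟩
      rw [← List.reverse_append, List.takeWhile_append_dropWhile, List.reverse_reverse]
    obtain ⟨t, ht⟩ := hpre
    have hx : PySem.Chars.isspace x = false := by
      have := List.head?_dropWhile_not PySem.Chars.isspace u
      rw [show List.dropWhile PySem.Chars.isspace u = PySem.Chars.lstrip u from rfl, ← ht] at this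
      simpa using this
    simp [PySem.Chars.lstrip, hx]

theorem pv_strip_idem (l : List Char) :
    PySem.Chars.strip (PySem.Chars.strip l) = PySem.Chars.strip l := by
  rw [PySem.Chars.strip, PySem.Chars.strip, pv_lstrip_rstrip_lstrip]
  rw [PySem.Chars.rstrip, PySem.Chars.rstrip, List.reverse_reverse, List.dropWhile_idempotent]

theorem pv_splitOn_go_ne_nil (sep : List Char) :
    ∀ (fuel : Nat) (l cur : List Char) (acc : List (List Char)),
      PySem.Chars.splitOn.go sep fuel l cur acc ≠ [] := by
  intro fuel
  induction fuel with
  | zero => intro l cur acc; rw [PySem.Chars.splitOn.go]; simp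
  | succ n ih =>
    intro l cur acc
    cases l with
    | nil =>
      rw [PySem.Chars.splitOn.go]
      · simp
      · omega
    | cons x rest =>
      rw [PySem.Chars.splitOn.go]
      by_cases hpre : sep.isPrefixOf (x :: rest) = true
      · rw [if_pos hpre]; exact ih _ _ _
      · rw [if_neg hpre]; exact ih _ _ _

theorem pv_splitOn_ne_nil (s sep : List Char) : PySem.Chars.splitOn s sep ≠ [] := by
  rw [PySem.Chars.splitOn]; exact pv_splitOn_go_ne_nil sep _ s [] []

-- the accumulator of splitOn.go only prepends (reversed) to the result
theorem pv_go_acc (c : Char) :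
    ∀ (l cur : List Char) (acc : List (List Char)) (f : Nat),
      PySem.Chars.splitOn.go [c] f l cur acc =
        acc.reverse ++ PySem.Chars.splitOn.go [c] f l cur [] := by
  intro l
  induction l with
  | nil =>
    intro cur acc f
    cases f with
    | zero => rw [PySem.Chars.splitOn.go, PySem.Chars.splitOn.go]; simp
    | succ n =>
      rw [PySem.Chars.splitOn.go, PySem.Chars.splitOn.go] <;> simp
  | cons x rest ih =>
    intro cur acc f
    cases f with
    | zero => rw [PySem.Chars.splitOn.go, PySem.Chars.splitOn.go]; simp
    | succ n =>
      rw [PySem.Chars.splitOn.go, PySem.Chars.splitOn.go]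
      by_cases hpre : [c].isPrefixOf (x :: rest) = true
      · rw [if_pos hpre, if_pos hpre]
        simp only [List.length_cons, List.length_nil, List.drop_succ_cons, List.drop_zero]
        rw [ih _ ((cur.reverse) :: acc) n, ih _ [cur.reverse] n]
        simp
      · rw [if_neg hpre, if_neg hpre]
        exact ih _ _ _

-- consuming a comma-free prefix plus the first separator
theorem pv_go_split (c : Char) :
    ∀ (l₁ l₂ cur : List Char) (acc : List (List Char)) (f : Nat), c ∉ l₁ →
      (l₁ ++ c :: l₂).length ≤ f →
      PySem.Chars.splitOn.go [c] f (l₁ ++ c :: l₂) cur acc =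
        PySem.Chars.splitOn.go [c] (f - (l₁.length + 1)) l₂ []
          ((cur.reverse ++ l₁) :: acc) := by
  intro l₁
  induction l₁ with
  | nil =>
    intro l₂ cur acc f _ hf
    simp only [List.nil_append, List.length_cons] at hf ⊢
    cases f with
    | zero => omega
    | succ n =>
      rw [PySem.Chars.splitOn.go]
      have hpre : [c].isPrefixOf (c :: l₂) = true := by simp [List.isPrefixOf]
      rw [if_pos hpre]
      simp
  | cons x l₁ ih =>
    intro l₂ cur acc f hnm hf
    have hx : x ≠ c := fun hh => hnm (hh ▸ List.mem_cons_self)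
    simp only [List.cons_append, List.length_cons, List.length_append] at hf ⊢
    cases f with
    | zero => omega
    | succ n =>
      rw [PySem.Chars.splitOn.go]
      have hpre : [c].isPrefixOf (x :: (l₁ ++ c :: l₂)) = false := by
        simp [List.isPrefixOf]; exact fun hh => (hx hh.symm).elim
      rw [hpre]
      simp only [Bool.false_eq_true, if_false]
      rw [ih l₂ (x :: cur) acc n (fun hh => hnm (List.mem_cons_of_mem _ hh))
        (by simp only [List.length_append, List.length_cons]; omega)]
      simp only [List.reverse_cons, List.append_assoc, List.singleton_append]
      rw [show n + 1 - (l₁.length + 1 + 1) = n - (l₁.length + 1) from by omega]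

theorem pv_splitOn_first {c : Char} {l₁ l₂ : List Char} (h : c ∉ l₁) :
    PySem.Chars.splitOn (l₁ ++ c :: l₂) [c] = l₁ :: PySem.Chars.splitOn l₂ [c] := by
  rw [PySem.Chars.splitOn, pv_go_split c l₁ l₂ [] [] _ h (by omega)]
  have hf : (l₁ ++ c :: l₂).length + 1 - (l₁.length + 1) = l₂.length + 1 := by
    simp only [List.length_append, List.length_cons]; omega
  rw [hf]
  simp only [List.reverse_nil, List.nil_append]
  rw [pv_go_acc c l₂ [] [l₁] (l₂.length + 1)]
  rw [PySem.Chars.splitOn]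
  simp

-- splitOnMax.go with maxsplit exhausted returns the rest as one piece
theorem pv_goM_mzero (c : Char) (f : Nat) (l cur : List Char) (acc : List (List Char)) :
    PySem.Chars.splitOnMax.go [c] f 0 l cur acc = ((cur.reverse ++ l) :: acc).reverse := by
  cases f with
  | zero => rw [PySem.Chars.splitOnMax.go]
  | succ n =>
    cases l with
    | nil => rw [PySem.Chars.splitOnMax.go] <;> simp
    | cons x rest => rw [PySem.Chars.splitOnMax.go]; simp

theorem pv_goM_split (c : Char) :
    ∀ (l₁ l₂ cur : List Char) (acc : List (List Char)) (f : Nat), c ∉ l₁ →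
      (l₁ ++ c :: l₂).length ≤ f →
      PySem.Chars.splitOnMax.go [c] f 1 (l₁ ++ c :: l₂) cur acc =
        (l₂ :: (cur.reverse ++ l₁) :: acc).reverse := by
  intro l₁
  induction l₁ with
  | nil =>
    intro l₂ cur acc f _ hf
    simp only [List.nil_append, List.length_cons] at hf ⊢
    cases f with
    | zero => omega
    | succ n =>
      rw [PySem.Chars.splitOnMax.go]
      have hpre : [c].isPrefixOf (c :: l₂) = true := by simp [List.isPrefixOf]
      rw [if_neg (by omega : ¬ (1 : Nat) = 0), if_pos hpre]
      simp only [List.length_cons, List.length_nil, List.drop_succ_cons, List.drop_zero]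
      rw [pv_goM_mzero]
      simp
  | cons x l₁ ih =>
    intro l₂ cur acc f hnm hf
    have hx : x ≠ c := fun hh => hnm (hh ▸ List.mem_cons_self)
    simp only [List.cons_append, List.length_cons, List.length_append] at hf ⊢
    cases f with
    | zero => omega
    | succ n =>
      rw [PySem.Chars.splitOnMax.go]
      have hpre : [c].isPrefixOf (x :: (l₁ ++ c :: l₂)) = false := by
        simp [List.isPrefixOf]; exact fun hh => (hx hh.symm).elim
      rw [if_neg (by omega : ¬ (1 : Nat) = 0), hpre]
      simp only [Bool.false_eq_true, if_false]
      rw [ih l₂ (x :: cur) acc n (fun hh => hnm (List.mem_cons_of_mem _ hh)) (by simp only [List.length_append, List.length_cons]; omega)]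
      simp

theorem pv_splitOnMax_first {c : Char} {l₁ l₂ : List Char} (h : c ∉ l₁) :
    PySem.Chars.splitOnMax (l₁ ++ c :: l₂) [c] 1 = [l₁, l₂] := by
  rw [PySem.Chars.splitOnMax]
  rw [if_neg (by omega : ¬ (1 : Int) < 0)]
  rw [show (1 : Int).toNat = 1 from rfl]
  rw [pv_goM_split c l₁ l₂ [] [] _ h (by omega)]
  simp

-- decomposition of a list at the first occurrence found by find
theorem pv_find_decomp (c : Char) (l : List Char) (h : 0 ≤ PySem.Chars.find l [c]) :
    l = l.take (PySem.Chars.find l [c]).toNat ++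
          c :: l.drop ((PySem.Chars.find l [c]).toNat + 1) ∧
      c ∉ l.take (PySem.Chars.find l [c]).toNat := by
  obtain ⟨hpre, hmin⟩ := PySem.Chars.find_spec h
  set e := (PySem.Chars.find l [c]).toNat with he
  obtain ⟨t, ht⟩ := hpre
  simp only [List.singleton_append] at ht
  have hdrop : l.drop e = c :: t := ht.symm
  have hlt : e < l.length := by
    by_contra hge
    rw [List.drop_eq_nil_of_le (by omega)] at hdrop
    exact (List.cons_ne_nil _ _) hdrop.symm
  constructor
  · conv_lhs => rw [← List.take_append_drop e l]
    congr 1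
    rw [hdrop]
    congr 1
    have : l.drop (e + 1) = (l.drop e).drop 1 := by rw [List.drop_drop]
    rw [this, hdrop]
    rfl
  · intro hc
    obtain ⟨i, hi, hgi⟩ := List.getElem_of_mem hc
    have hi' := hi
    simp only [List.length_take] at hi'
    have hilen : i < l.length := by omega
    have hie : i < e := by omega
    refine hmin i hie ⟨l.drop (i + 1), ?_⟩
    rw [List.getElem_take] at hgi
    rw [List.singleton_append, ← hgi]
    exact (List.drop_eq_getElem_cons hilen).symm

-- the per-part store agrees with A's mixed-branch body on a stripped part
theorem pv_store_eq_stepA (d : PySem.Dict (List Char) (List Char)) (i : Int) (part : List Char)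
    (hstr : PySem.Chars.strip part = part) :
    (if PySem.Chars.isIn ['='] part then
        match PySem.Chars.splitOnMax part ['='] 1 with
        | key :: value :: _ =>
            d.insert (PySem.Chars.strip key)
              (PySem.Chars.stripChars (PySem.Chars.strip value) ['"', '\''])
        | _ => d
      else
        d.insert (if i = 0 then "query".toList else "arg".toList ++ PySem.Int.toChars i)
          (PySem.Chars.stripChars (PySem.Chars.strip part) ['"', '\''])) =
      pvStore d part i := by
  unfold pvStore
  by_cases hin : PySem.Chars.isIn ['='] part = true
  · rw [if_pos hin]
    have h0 : 0 ≤ PySem.Chars.find part ['='] := by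
      rw [PySem.Chars.find_nonneg_iff, ← PySem.Chars.isIn_iff_infix]; exact hin
    obtain ⟨hdec, hnm⟩ := pv_find_decomp '=' part h0
    rw [if_pos h0]
    conv_lhs => rw [hdec]
    rw [pv_splitOnMax_first hnm]
    rw [PySem.List.slice_to _ h0, PySem.List.slice_from _ (by omega : (0:Int) ≤ _ + 1)]
    have : (PySem.Chars.find part ['='] + 1).toNat = (PySem.Chars.find part ['=']).toNat + 1 := by
      omega
    rw [this]
  · rw [if_neg hin]
    have h0 : ¬ 0 ≤ PySem.Chars.find part ['='] := by
      rw [PySem.Chars.find_nonneg_iff, ← PySem.Chars.isIn_iff_infix]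
      simpa using hin
    rw [if_neg h0, hstr]

-- the cursor scan of Source B is the fold of pvStore over the stripped comma parts
theorem pv_pvGo_eq (rest : List Char) (i : Int) (d : PySem.Dict (List Char) (List Char)) :
    pvGo rest i d =
      (PySem.List.enumerate ((PySem.Chars.splitOn rest [',']).map PySem.Chars.strip) i).foldl
        (fun d ip => pvStore d ip.2 ip.1) d := by
  induction rest, i, d using pvGo.induct with
  | case1 rest i d j hj =>
    rw [pvGo]
    rw [dif_pos hj]
    have hj1 : PySem.Chars.find rest [','] = -1 := by
      have := PySem.Chars.neg_one_le_find rest [',']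
      omega
    have hnm : ',' ∉ rest := by
      intro hm
      have : 0 ≤ PySem.Chars.find rest [','] := by
        rw [PySem.Chars.find_nonneg_iff]
        exact (List.singleton_infix_iff ',' rest).mpr hm
      omega
    rw [pv_splitOn_not_mem hnm]
    simp [PySem.List.enumerate]
  | case2 rest i d j hj ih =>
    rw [pvGo]
    rw [dif_neg hj]
    have hj0 : (0:Int) ≤ j := by omega
    obtain ⟨hdec, hnm⟩ := pv_find_decomp ',' rest hj0
    rw [ih]
    rw [PySem.List.slice_to _ hj0, PySem.List.slice_from _ (by omega : (0:Int) ≤ j + 1),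
        show (j + 1).toNat = j.toNat + 1 from by omega]
    conv_rhs => rw [hdec]
    rw [pv_splitOn_first hnm]
    simp only [List.map_cons]
    rw [PySem.List.enumerate.eq_2, List.foldl_cons]

-- ===== VERDICT (by name: the statement is the Claim_ definition above) =====
theorem parse_bracket_arguments_py_spec : Claim_equal_parse_bracket_arguments_py := by
  intro args_str _
  unfold Spec_parse_bracket_arguments_py
  simp only [parse_bracket_arguments_py, parse_bracket_arguments_py_alt]
  set s := PySem.Chars.strip args_str.toList with hs
  by_cases h1 : s = []
  · rw [if_pos h1, if_pos h1]
  rw [if_neg h1, if_neg h1]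
  by_cases h2 : (PySem.Chars.startswith s ['#', 'E'] && !PySem.Chars.isIn [','] s) = true
  · rw [if_pos h2, if_pos h2]
  rw [if_neg h2, if_neg h2]
  rw [pv_pvGo_eq]
  have hstripped : ∀ p ∈ (PySem.Chars.splitOn s [',']).map PySem.Chars.strip,
      PySem.Chars.strip p = p := by
    intro p hp; rcases List.mem_map.mp hp with ⟨q, _, rfl⟩; exact pv_strip_idem q
  by_cases h3 : PySem.Chars.isIn ['='] s = true
  · rw [if_pos h3]
    congr 2
    refine PySem.List.foldl_congr_mem _ _ _ _ (fun acc ip hip => ?_)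
    have hmem : ip.2 ∈ (PySem.Chars.splitOn s [',']).map PySem.Chars.strip := by
      rcases (PySem.List.mem_enumerate_iff _ 0 ip).mp hip with ⟨k, hk, rfl⟩
      exact List.getElem_mem hk
    exact pv_store_eq_stepA acc ip.1 ip.2 (hstripped _ hmem)
  rw [if_neg h3]
  have h3' : PySem.Chars.isIn ['='] s = false := by simpa using h3
  have hnoeq : ∀ p ∈ (PySem.Chars.splitOn s [',']).map PySem.Chars.strip,
      ¬ 0 ≤ PySem.Chars.find p ['='] := by
    intro p hp
    rw [PySem.Chars.find_nonneg_iff, ← PySem.Chars.isIn_iff_infix]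
    intro hin
    rw [pv_isIn_singleton] at hin
    rcases List.mem_map.mp hp with ⟨q, hq, rfl⟩
    exact absurd ((pv_isIn_singleton _ _).mpr (pv_splitOn_chars hq (pv_mem_strip hin))) (by simp [h3'])
  by_cases h4 : PySem.Chars.isIn [','] s = true
  · rw [if_pos h4]
    rcases hP : (PySem.Chars.splitOn s [',']).map PySem.Chars.strip with _ | ⟨p0, rest⟩
    · exact absurd (List.map_eq_nil_iff.mp hP) (pv_splitOn_ne_nil s [','])
    simp only []
    have hp0 : p0 ∈ (PySem.Chars.splitOn s [',']).map PySem.Chars.strip := by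
      rw [hP]; exact List.mem_cons_self
    congr 2
    rw [PySem.List.enumerate.eq_2, List.foldl_cons]
    unfold pvStore
    rw [if_neg (hnoeq p0 hp0)]
    simp only []
    symm
    refine PySem.List.foldl_congr_mem _ _ _ _ (fun acc ip hip => ?_)
    rcases (PySem.List.mem_enumerate_iff rest 1 ip).mp hip with ⟨k, hk, rfl⟩
    have hmem : rest[k] ∈ (PySem.Chars.splitOn s [',']).map PySem.Chars.strip := by
      rw [hP]; exact List.mem_cons_of_mem _ (List.getElem_mem hk)
    rw [if_neg (hnoeq _ hmem)]
    rw [if_neg (by omega : ¬ ((1 : Int) + k = 0))]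
    rw [hstripped _ hmem]
  · rw [if_neg h4]
    have hc : ',' ∉ s := fun hm => h4 ((pv_isIn_singleton _ _).mpr hm)
    have hss : PySem.Chars.strip s = s := by rw [hs]; exact pv_strip_idem _
    rw [pv_splitOn_not_mem hc]
    simp only [List.map_cons, List.map_nil, hss]
    rw [PySem.List.enumerate.eq_2, PySem.List.enumerate.eq_1, List.foldl_cons, List.foldl_nil]
    unfold pvStore
    have hs0 : ¬ 0 ≤ PySem.Chars.find s ['='] := by
      rw [PySem.Chars.find_nonneg_iff, ← PySem.Chars.isIn_iff_infix]; simp [h3']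
    rw [if_neg hs0]
    rfl
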